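-- pv_equiv track=rewrite | github.com/CrotAA/VoiceRuntime | services/funasr_ws_server.py | merge_transcript
-- ===== SOURCE A (Python) =====
-- def merge_transcript(existing: str, incoming: str) -> str:
--     left = str(existing or "").strip()
--     right = str(incoming or "").strip()
--
--     if not right:
--         return left
--
--     if not left:
--         return right
--
--     if right.startswith(left):
--         return right
--
--     if left.endswith(right):
--         return left
--
--     if right in left:
--         return left
--
--     if left in right:
--         return right
--
--     max_overlap = min(len(left), len(right))
--     for size in range(max_overlap, 0, -1):
--         if left.endswith(right[:size]):
--             return left + right[size:]
--
--     return left + right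
-- ===== SOURCE B (Python) =====
-- def merge_transcript(existing: str, incoming: str) -> str:
--     left = str(existing or "").strip()
--     right = str(incoming or "").strip()
--
--     if not left:
--         return right
--     if not right:
--         return left
--
--     if right in left:
--         return left
--     if left in right:
--         return right
--
--     # KMP: longest suffix of left that is a prefix of right, in linear time.
--     n = len(right)
--     pi = [0] * n
--     k = 0
--     for i in range(1, n):
--         while k > 0 and right[i] != right[k]:
--             k = pi[k - 1]
--         if right[i] == right[k]:
--             k += 1
--         pi[i] = k
--
--     k = 0
--     for c in left:
--         while k > 0 and c != right[k]:
--             k = pi[k - 1]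
--         if c == right[k]:
--             k += 1
--         # k == n is impossible here: right is not a substring of left
--
--     return left + right[k:]
-- ===== Notes on version B (the rewrite author's own statement) =====
-- stated objective: faster
-- what changed: The descending overlap loop that tries every size with a fresh right[:size] slice plus endswith is replaced by a single KMP pass (failure table on right, then one automaton scan of left), which also yields the 'right in left' containment answer implicitly; the containment early-outs are kept as plain 'in' checks.
import Mathlib
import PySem

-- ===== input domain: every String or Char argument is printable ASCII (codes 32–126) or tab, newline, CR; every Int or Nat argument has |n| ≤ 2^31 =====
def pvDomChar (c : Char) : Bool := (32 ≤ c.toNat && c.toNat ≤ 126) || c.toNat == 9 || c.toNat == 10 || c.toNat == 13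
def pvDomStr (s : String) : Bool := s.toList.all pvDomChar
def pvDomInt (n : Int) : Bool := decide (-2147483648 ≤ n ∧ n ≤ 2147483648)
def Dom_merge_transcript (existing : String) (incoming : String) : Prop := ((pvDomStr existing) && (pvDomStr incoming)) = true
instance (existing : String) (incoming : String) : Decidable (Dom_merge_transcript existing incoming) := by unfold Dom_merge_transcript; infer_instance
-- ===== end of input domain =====

-- B replaces A's quadratic descending overlap scan (each size tried via a fresh
-- right[:size] slice + endswith) by a single linear KMP pass; a timing run
-- decides whether 'faster' may be claimed, see claim.json.

-- ===== PORT A =====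
-- A's loop 'for size in range(max_overlap, 0, -1)': structural recursion on size,
-- size = 0 is the fall-through 'return left + right'.
def mtLoopA (left right : List Char) : Nat → List Char
  | 0 => left ++ right
  | (size+1) =>
      if PySem.Chars.endswith left (PySem.List.slice right none (some ((size + 1 : Nat) : Int))) then
        left ++ PySem.List.slice right (some ((size + 1 : Nat) : Int)) none
      else mtLoopA left right size

def mergeA (left right : List Char) : List Char :=
  if right = [] then left
  else if left = [] then right
  else if PySem.Chars.startswith right left then right
  else if PySem.Chars.endswith left right then left
  else if PySem.Chars.isIn right left then left
  else if PySem.Chars.isIn left right then right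
  else mtLoopA left right (min left.length right.length)

def merge_transcript (existing : String) (incoming : String) : String :=
  String.ofList (mergeA (PySem.Chars.strip existing.toList) (PySem.Chars.strip incoming.toList))

-- ===== PORT B =====
-- Python's 'while k > 0 and c != right[k]: k = pi[k-1]' then 'if c == right[k]: k += 1'.
-- The fuel argument only makes the descent total (the table satisfies tab[z] ≤ z, so
-- fuel = current state always suffices); indices are nonnegative and in range in Source B,
-- so List.getD is exact here.
def kmpStep (p : List Char) (tab : List Nat) (c : Char) : Nat → Nat → Nat
  | _, 0 => if c = p.getD 0 ' ' then 1 else 0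
  | 0, _+1 => 0
  | f+1, z+1 => if c = p.getD (z+1) ' ' then z + 2 else kmpStep p tab c f (tab.getD z 0)

-- 'pi = [0]*n' then 'for i in range(1, n): ... pi[i] = k' — the sequential writes are
-- ported as appends; range(1, n) over nonnegative bounds is List.range' 1 (n-1), exact.
def kmpTable (p : List Char) : List Nat :=
  ((List.range' 1 (p.length - 1)).foldl
    (fun acc i =>
      let k := kmpStep p acc.1 (p.getD i ' ') acc.2 acc.2
      (acc.1 ++ [k], k))
    (([0] : List Nat), 0)).1

def mergeB (left right : List Char) : List Char :=
  if left = [] then right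
  else if right = [] then left
  else if PySem.Chars.isIn right left then left
  else if PySem.Chars.isIn left right then right
  else
    let tab := kmpTable right
    let k := left.foldl (fun z c => kmpStep right tab c z z) 0
    left ++ PySem.List.slice right (some ((k : Nat) : Int)) none

def merge_transcript_alt (existing : String) (incoming : String) : String :=
  String.ofList (mergeB (PySem.Chars.strip existing.toList) (PySem.Chars.strip incoming.toList))

-- ===== PRECONDITION & SPEC =====
def Spec_merge_transcript (existing : String) (incoming : String) (out : String) : Prop := out = merge_transcript_alt existing incoming
instance (existing : String) (incoming : String) (out : String) : Decidable (Spec_merge_transcript existing incoming out) := by unfold Spec_merge_transcript; infer_instance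

-- ===== CLAIM (what is proved, stated in full; the proofs are below) =====
def Claim_equal_merge_transcript : Prop := ∀ (existing : String) (incoming : String), Dom_merge_transcript existing incoming → Spec_merge_transcript existing incoming (merge_transcript existing incoming)

-- ===== LEMMAS AND PROOFS =====

-- q p t = the largest k ≤ |p| with p.take k a suffix of t (the KMP automaton's state).
def qv (p t : List Char) : Nat := Nat.findGreatest (fun k => p.take k <:+ t) p.length

-- bspec p k = the longest proper border of p.take k (the value pi[k-1] must hold).
def bspec (p : List Char) (k : Nat) : Nat := Nat.findGreatest (fun j => p.take j <:+ p.take k) (k - 1)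

theorem suffix_of_suffix_length_le {u v t : List Char} (hu : u <:+ t) (hv : v <:+ t)
    (h : u.length ≤ v.length) : u <:+ v := by
  rw [← List.reverse_prefix] at hu hv ⊢
  exact List.prefix_of_prefix_length_le hu hv (by simpa using h)

theorem snoc_suffix_snoc {u t : List Char} {a c : Char} :
    u ++ [a] <:+ t ++ [c] ↔ u <:+ t ∧ a = c := by
  rw [← List.reverse_prefix, List.reverse_append, List.reverse_append]
  simp [List.cons_prefix_cons, List.reverse_prefix, and_comm]

theorem take_succ_getD {p : List Char} {m : Nat} (h : m < p.length) :
    p.take (m + 1) = p.take m ++ [p.getD m ' '] := by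
  rw [List.take_add_one, List.getD_eq_getElem p ' ' h]
  simp [List.getElem?_eq_getElem h]

theorem fg_ext (P : Nat → Prop) [DecidablePred P] (b : Nat) :
    ∀ b', b ≤ b' → (∀ m, b < m → m ≤ b' → ¬ P m) →
      Nat.findGreatest P b' = Nat.findGreatest P b := by
  intro b' hle h
  induction b' with
  | zero =>
      obtain rfl : b = 0 := Nat.le_zero.mp hle
      rfl
  | succ n ih =>
      rcases Nat.eq_or_lt_of_le hle with h1 | h1
      · rw [h1]
      · rw [Nat.findGreatest_succ, if_neg (h (n+1) (by omega) le_rfl)]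
        exact ih (by omega) (fun m hm1 hm2 => h m hm1 (by omega))

theorem bspec_le (p : List Char) (k : Nat) : bspec p k ≤ k - 1 := Nat.findGreatest_le _

theorem bspec_suffix (p : List Char) (k : Nat) : p.take (bspec p k) <:+ p.take k :=
  Nat.findGreatest_spec (P := fun j => p.take j <:+ p.take k) (Nat.zero_le _)
    (by simp [List.nil_suffix])

-- The KMP descent from a state k that is a p-prefix suffix of t computes the longest
-- p-prefix suffix of t ++ [c] among candidates ≤ k + 1.
theorem kmp_step_spec (p : List Char) (tab : List Nat) (c : Char) (t : List Char) :
    ∀ k f, k ≤ f → k < p.length →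
      (∀ z, z + 1 ≤ k → tab.getD z 0 = bspec p (z + 1)) →
      p.take k <:+ t →
      kmpStep p tab c f k = Nat.findGreatest (fun m => p.take m <:+ t ++ [c]) (k + 1) := by
  intro k
  induction k using Nat.strong_induction_on with
  | _ k ih =>
    intro f hf hk htab hsfx
    cases k with
    | zero =>
        have h1 : p.take 1 <:+ t ++ [c] ↔ c = p.getD 0 ' ' := by
          rw [take_succ_getD hk,
            show p.take 0 ++ [p.getD 0 ' '] = [] ++ [p.getD 0 ' '] by simp,
            snoc_suffix_snoc]
          simp [eq_comm]
        rw [Nat.findGreatest_succ]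
        cases f with
        | zero =>
            simp only [kmpStep]
            by_cases hc : c = p.getD 0 ' '
            · rw [if_pos hc, if_pos (h1.mpr hc)]
            · rw [if_neg hc, if_neg (fun h => hc (h1.mp h))]; rfl
        | succ f' =>
            simp only [kmpStep]
            by_cases hc : c = p.getD 0 ' '
            · rw [if_pos hc, if_pos (h1.mpr hc)]
            · rw [if_neg hc, if_neg (fun h => hc (h1.mp h))]; rfl
    | succ z =>
        cases f with
        | zero => omega
        | succ f' =>
            simp only [kmpStep]
            by_cases hc : c = p.getD (z+1) ' '
            · rw [if_pos hc, Nat.findGreatest_succ, if_pos ?_]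
              rw [take_succ_getD hk]
              exact snoc_suffix_snoc.mpr ⟨hsfx, hc.symm⟩
            · rw [if_neg hc]
              rw [htab z le_rfl]
              have hble : bspec p (z+1) ≤ z := by have := bspec_le p (z+1); omega
              have hbsf : p.take (bspec p (z+1)) <:+ t := (bspec_suffix p (z+1)).trans hsfx
              rw [ih (bspec p (z+1)) (by omega) f' (by omega) (by omega)
                (fun z' hz' => htab z' (by omega)) hbsf]
              refine (fg_ext _ (bspec p (z+1) + 1) (z+2) (by omega) ?_).symm
              intro m hm1 hm2 hP
              obtain ⟨m', rfl⟩ : ∃ m', m = m'+1 := ⟨m-1, by omega⟩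
              have hmlen : m' < p.length := by omega
              rw [take_succ_getD hmlen] at hP
              obtain ⟨h1, h2⟩ := snoc_suffix_snoc.mp hP
              by_cases hmz : m' = z+1
              · exact hc (by rw [hmz] at h2; exact h2.symm)
              · have h3 : p.take m' <:+ p.take (z+1) :=
                  suffix_of_suffix_length_le h1 hsfx (by
                    simp only [List.length_take]; omega)
                exact Nat.findGreatest_is_greatest
                  (show bspec p (z+1) < m' by omega) (by omega) h3

-- One table-building iteration: from pi = [bspec 1 … bspec i], k = bspec i, index i
-- produces pi[i] = bspec (i+1); the fold finishes the whole table.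
theorem kmpTable_go (p : List Char) :
    ∀ m i, 1 ≤ i → i + m = p.length →
      (List.range' i m).foldl
        (fun acc j =>
          let k := kmpStep p acc.1 (p.getD j ' ') acc.2 acc.2
          (acc.1 ++ [k], k))
        ((List.range i).map (fun j => bspec p (j + 1)), bspec p i)
      = ((List.range p.length).map (fun j => bspec p (j + 1)), bspec p p.length) := by
  intro m
  induction m with
  | zero =>
      intro i h1 h2
      obtain rfl : i = p.length := by omega
      rfl
  | succ m ih =>
      intro i h1 h2
      have hilen : i < p.length := by omega
      have hble : bspec p i ≤ i - 1 := bspec_le p i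
      rw [List.range'_succ, List.foldl_cons]
      have hK : kmpStep p ((List.range i).map (fun j => bspec p (j + 1)))
          (p.getD i ' ') (bspec p i) (bspec p i) = bspec p (i + 1) := by
        rw [kmp_step_spec p _ (p.getD i ' ') (p.take i) (bspec p i) (bspec p i) le_rfl
          (by omega)
          (fun z hz => PySem.List.getD_map_range _ i z 0 (by omega))
          (bspec_suffix p i)]
        rw [← take_succ_getD hilen]
        show Nat.findGreatest (fun m => p.take m <:+ p.take (i + 1)) (bspec p i + 1)
              = Nat.findGreatest (fun j => p.take j <:+ p.take (i + 1)) (i + 1 - 1)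
        rw [show i + 1 - 1 = i from rfl]
        refine (fg_ext _ (bspec p i + 1) i (by omega) ?_).symm
        intro m hm1 hm2 hP
        obtain ⟨m', rfl⟩ : ∃ m'', m = m'' + 1 := ⟨m - 1, by omega⟩
        have hmlen : m' < p.length := by omega
        rw [take_succ_getD hmlen, take_succ_getD hilen] at hP
        obtain ⟨hq1, hq2⟩ := snoc_suffix_snoc.mp hP
        exact Nat.findGreatest_is_greatest (show bspec p i < m' by omega) (by omega) hq1
      dsimp only
      rw [hK]
      rw [show (List.range i).map (fun j => bspec p (j + 1)) ++ [bspec p (i + 1)]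
            = (List.range (i + 1)).map (fun j => bspec p (j + 1)) by
        rw [List.range_succ, List.map_append]; rfl]
      exact ih (i + 1) (by omega) (by omega)

-- The table built by B is [bspec p 1, …, bspec p n].
theorem kmpTable_eq (p : List Char) (hp : p ≠ []) :
    kmpTable p = (List.range p.length).map (fun j => bspec p (j + 1)) := by
  have hlen : 1 ≤ p.length := List.length_pos_of_ne_nil hp
  unfold kmpTable
  rw [show (([0] : List Nat), 0)
        = ((List.range 1).map (fun j => bspec p (j + 1)), bspec p 1) from rfl]
  rw [kmpTable_go p (p.length - 1) 1 le_rfl (by omega)]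

-- Scanning the text l through the automaton yields qv p l, provided p never fully occurs.
theorem kmp_scan_eq (p : List Char) (tab : List Nat) (l : List Char) (hp : p ≠ [])
    (htab : ∀ z, z + 1 < p.length → tab.getD z 0 = bspec p (z + 1))
    (hni : ¬ p <:+: l) :
    l.foldl (fun z c => kmpStep p tab c z z) 0 = qv p l := by
  have hlen : 1 ≤ p.length := List.length_pos_of_ne_nil hp
  have h0 : qv p [] = 0 := by
    unfold qv
    refine fg_ext _ 0 p.length (Nat.zero_le _) ?_
    intro m hm1 hm2 h
    rw [List.suffix_nil] at h
    have h2 := congrArg List.length h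
    rw [List.length_take] at h2
    simp only [List.length_nil] at h2
    omega
  have main : ∀ rest t, t ++ rest = l →
      rest.foldl (fun z c => kmpStep p tab c z z) (qv p t) = qv p l := by
    intro rest
    induction rest with
    | nil =>
        intro t h
        rw [List.append_nil] at h
        rw [h]
        rfl
    | cons c rest ih =>
        intro t h
        have hql : p.take (qv p t) <:+ t :=
          Nat.findGreatest_spec (P := fun k => p.take k <:+ t) (Nat.zero_le _) (by simp)
        have hqle : qv p t ≤ p.length := Nat.findGreatest_le _
        have hqlt : qv p t < p.length := by
          rcases Nat.lt_or_ge (qv p t) p.length with h' | h'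
          · exact h'
          · exfalso
            have heq : qv p t = p.length := by omega
            rw [heq, List.take_length] at hql
            exact hni (hql.isInfix.trans (List.IsPrefix.isInfix ⟨c :: rest, h⟩))
        rw [List.foldl_cons]
        rw [kmp_step_spec p tab c t (qv p t) (qv p t) le_rfl hqlt
          (fun z hz => htab z (by omega)) hql]
        have hq : qv p (t ++ [c])
            = Nat.findGreatest (fun m => p.take m <:+ t ++ [c]) (qv p t + 1) := by
          unfold qv
          refine fg_ext _ (qv p t + 1) p.length (by omega) ?_
          intro m hm1 hm2 hP
          obtain ⟨m', rfl⟩ : ∃ m'', m = m'' + 1 := ⟨m - 1, by omega⟩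
          have hmlen : m' < p.length := by omega
          rw [take_succ_getD hmlen] at hP
          obtain ⟨hq1, hq2⟩ := snoc_suffix_snoc.mp hP
          have h3 : m' ≤ qv p t := Nat.le_findGreatest (P := fun k => p.take k <:+ t)
            (show m' ≤ p.length by omega) hq1
          omega
        rw [← hq]
        exact ih (t ++ [c]) (by simpa using h)
  have := main l [] rfl
  rw [h0] at this
  exact this

-- A's descending scan returns the largest overlap ≤ n.
theorem mtLoopA_eq (l r : List Char) :
    ∀ n, mtLoopA l r n = l ++ r.drop (Nat.findGreatest (fun k => r.take k <:+ l) n) := by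
  intro n
  induction n with
  | zero => simp [mtLoopA]
  | succ m ih =>
      rw [mtLoopA]
      rw [PySem.List.slice_to_natCast, PySem.List.slice_from_natCast]
      by_cases h : r.take (m + 1) <:+ l
      · rw [if_pos (by simpa [PySem.Chars.endswith_iff] using h),
          Nat.findGreatest_succ, if_pos h]
      · rw [if_neg (by simpa [PySem.Chars.endswith_iff] using h),
          Nat.findGreatest_succ, if_neg h, ih]

theorem mergeA_eq_mergeB (l r : List Char) : mergeA l r = mergeB l r := by
  unfold mergeA mergeB
  by_cases hr : r = []
  · by_cases hl : l = [] <;> simp [hr, hl]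
  · by_cases hl : l = []
    · simp [hr, hl]
    · rw [if_neg hr, if_neg hl, if_neg hl, if_neg hr]
      by_cases hsw : PySem.Chars.startswith r l = true
      · rw [if_pos hsw]
        have hinf : l <:+: r := ((PySem.Chars.startswith_iff r l).mp hsw).isInfix
        by_cases hin : PySem.Chars.isIn r l = true
        · rw [if_pos hin]
          have hrl : r <:+: l := (PySem.Chars.isIn_iff_infix r l).mp hin
          exact hrl.sublist.eq_of_length (le_antisymm hrl.length_le hinf.length_le)
        · rw [if_neg hin, if_pos ((PySem.Chars.isIn_iff_infix l r).mpr hinf)]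
      · rw [if_neg hsw]
        by_cases hew : PySem.Chars.endswith l r = true
        · rw [if_pos hew]
          have hrl : r <:+: l := ((PySem.Chars.endswith_iff l r).mp hew).isInfix
          rw [if_pos ((PySem.Chars.isIn_iff_infix r l).mpr hrl)]
        · rw [if_neg hew]
          by_cases hin1 : PySem.Chars.isIn r l = true
          · rw [if_pos hin1, if_pos hin1]
          · rw [if_neg hin1, if_neg hin1]
            by_cases hin2 : PySem.Chars.isIn l r = true
            · rw [if_pos hin2, if_pos hin2]
            · rw [if_neg hin2, if_neg hin2]
              dsimp only
              have hni : ¬ r <:+: l :=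
                (PySem.Chars.isIn_eq_false_iff r l).mp (by simpa using hin1)
              have htab : ∀ z, z + 1 < r.length →
                  (kmpTable r).getD z 0 = bspec r (z + 1) := by
                intro z hz
                rw [kmpTable_eq r hr]
                exact PySem.List.getD_map_range _ _ z 0 (by omega)
              rw [kmp_scan_eq r (kmpTable r) l hr htab hni]
              rw [PySem.List.slice_from_natCast, mtLoopA_eq]
              have hq : Nat.findGreatest (fun k => r.take k <:+ l)
                  (min l.length r.length) = qv r l := by
                unfold qv
                refine (fg_ext _ (min l.length r.length) r.length (by omega) ?_).symm
                intro m hm1 hm2 hP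
                have h1 := hP.length_le
                rw [List.length_take] at h1
                omega
              rw [hq]

theorem merge_transcript_spec : Claim_equal_merge_transcript := by
  intro existing incoming _
  unfold Spec_merge_transcript merge_transcript merge_transcript_alt
  rw [mergeA_eq_mergeB]
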